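-- pv_equiv track=rewrite | github.com/vuminhph/ca_lab | MiniProject/pseudo_24.py | is_cyclone_word
-- ===== SOURCE A (Python) =====
-- def is_cyclone_word(word):
--     ptr = 0
--     last_ptr = len(word) - 1
--
--     while ptr != last_ptr // 2:
--         next_ptr = last_ptr - ptr
--         if ptr > last_ptr // 2:
--             next_ptr += 1
--
--         if word[next_ptr].lower() < word[ptr].lower():
--             return False
--
--         ptr = next_ptr
--
--     return True
-- ===== SOURCE B (Python) =====
-- def is_cyclone_word(word):
--     mid = (len(word) - 1) // 2
--     lo, hi = 0, len(word) - 1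
--     seq = []
--     while True:
--         seq.append(word[lo].lower())
--         if lo == mid:
--             break
--         seq.append(word[hi].lower())
--         lo += 1
--         hi -= 1
--     return all(seq[k] <= seq[k + 1] for k in range(len(seq) - 1))
-- ===== Notes on version B (the rewrite author's own statement) =====
-- stated objective: alternative
-- what changed: Replaces the single in-place pointer loop with reflection arithmetic (next = last - ptr, +1 past the middle) by a build-then-verify two-pass: explicitly materialise the cyclone traversal with two pointers lo/hi alternating from the ends, then check the collected lowercase chain is non-decreasing with all().
import Mathlib
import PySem

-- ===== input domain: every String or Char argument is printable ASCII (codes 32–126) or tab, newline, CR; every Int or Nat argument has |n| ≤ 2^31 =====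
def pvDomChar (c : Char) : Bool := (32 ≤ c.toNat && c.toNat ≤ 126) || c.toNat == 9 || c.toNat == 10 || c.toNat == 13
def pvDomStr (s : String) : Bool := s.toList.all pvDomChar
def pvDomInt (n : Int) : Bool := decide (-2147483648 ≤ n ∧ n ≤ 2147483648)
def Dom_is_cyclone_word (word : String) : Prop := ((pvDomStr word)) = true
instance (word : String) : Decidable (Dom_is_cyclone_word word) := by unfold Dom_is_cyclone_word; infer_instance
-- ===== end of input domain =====

-- B replaces A's in-place reflection-arithmetic pointer loop by a build-then-verify
-- two-pass (collect the cyclone traversal with lo/hi pointers, then check the chain);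
-- objective: alternative decomposition, same cost.

-- ===== PORT A =====
-- A's while loop, fuel-bounded (fuel = len+1 always suffices: each visited index is new).
-- pyGet? = none is Python's IndexError (empty word); excluded by Pre_, value there immaterial.
def isCycloneLoopA (cs : List Char) (last : Int) : Int → Nat → Bool
  | _, 0 => true
  | ptr, fuel + 1 =>
    if ptr ≠ PySem.Int.floordiv last 2 then
      let next0 := last - ptr
      let next := if ptr > PySem.Int.floordiv last 2 then next0 + 1 else next0
      match PySem.List.pyGet? cs next, PySem.List.pyGet? cs ptr with
      | some cn, some cp =>
          if PySem.Chars.lowerChar cn < PySem.Chars.lowerChar cp then false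
          else isCycloneLoopA cs last next fuel
      | _, _ => false
    else true

def is_cyclone_word (word : String) : Bool :=
  let cs := word.toList
  isCycloneLoopA cs ((cs.length : Int) - 1) 0 (cs.length + 1)

-- ===== PORT B =====
-- B's build loop: append word[lo].lower(); stop at lo = mid; else append word[hi].lower().
-- none = IndexError (empty word only); fuel = len+1 suffices (lo advances to mid).
def buildSeqB (cs : List Char) (mid : Int) : Int → Int → Nat → Option (List Char)
  | _, _, 0 => none
  | lo, hi, fuel + 1 =>
    match PySem.List.pyGet? cs lo with
    | none => none
    | some c =>
      if lo = mid then some [PySem.Chars.lowerChar c]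
      else
        match PySem.List.pyGet? cs hi with
        | none => none
        | some d =>
          (buildSeqB cs mid (lo + 1) (hi - 1) fuel).map
            (fun r => PySem.Chars.lowerChar c :: PySem.Chars.lowerChar d :: r)

def is_cyclone_word_alt (word : String) : Bool :=
  let cs := word.toList
  let mid := PySem.Int.floordiv ((cs.length : Int) - 1) 2
  match buildSeqB cs mid 0 ((cs.length : Int) - 1) (cs.length + 1) with
  | none => false
  | some seq => (seq.zip seq.tail).all (fun p => decide (p.1 ≤ p.2))

-- ===== PRECONDITION & SPEC =====
-- Pre_ excludes only the empty string, on which A raises IndexError (word[0]); B raises there too.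
def Pre_is_cyclone_word (word : String) : Prop := word ≠ ""
instance (word : String) : Decidable (Pre_is_cyclone_word word) := by unfold Pre_is_cyclone_word; infer_instance
def pvWitness_is_cyclone_word : String := "acb"

def Spec_is_cyclone_word (word : String) (out : Bool) : Prop := out = is_cyclone_word_alt word
instance (word : String) (out : Bool) : Decidable (Spec_is_cyclone_word word out) := by unfold Spec_is_cyclone_word; infer_instance

-- ===== CLAIM =====
def Claim_equal_is_cyclone_word : Prop := ∀ (word : String), Dom_is_cyclone_word word → Pre_is_cyclone_word word → Spec_is_cyclone_word word (is_cyclone_word word)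

-- ===== LEMMAS AND PROOFS =====

-- allAdj l = Source B's all(seq[k] <= seq[k+1] …), the adjacent-pair check used by the alt port
def allAdj (l : List Char) : Bool := (l.zip l.tail).all (fun p => decide (p.1 ≤ p.2))

theorem floordiv_mid (n : Nat) (hn : 0 < n) :
    PySem.Int.floordiv ((n : Int) - 1) 2 = (((n - 1) / 2 : Nat) : Int) := by
  rw [show ((n : Int) - 1) = ((n - 1 : Nat) : Int) by omega]
  exact_mod_cast PySem.Int.floordiv_natCast (n - 1) 2

-- Joint invariant: from pointer lo (with lo ≤ mid), A's loop returns exactly the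
-- chain check of the suffix of B's traversal sequence built from (lo, n-1-lo).
theorem key_lemma (cs : List Char) (hn : 0 < cs.length) :
    ∀ (k lo fa fb : Nat), lo + k = (cs.length - 1) / 2 → 2 * k + 1 ≤ fa → k + 1 ≤ fb →
    ∃ seq : List Char,
      buildSeqB cs ((((cs.length - 1) / 2 : Nat) : Int)) (lo : Int) (((cs.length : Int) - 1) - (lo : Int)) fb = some seq ∧
      seq.head? = (cs[lo]?).map PySem.Chars.lowerChar ∧
      isCycloneLoopA cs ((cs.length : Int) - 1) (lo : Int) fa = allAdj seq := by
  intro k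
  induction k with
  | zero =>
    intro lo fa fb hk hfa hfb
    obtain ⟨fa', rfl⟩ : ∃ fa', fa = fa' + 1 := ⟨fa - 1, by omega⟩
    obtain ⟨fb', rfl⟩ : ∃ fb', fb = fb' + 1 := ⟨fb - 1, by omega⟩
    have hlo : lo < cs.length := by omega
    have hmid : ((lo : Int)) = PySem.Int.floordiv ((cs.length : Int) - 1) 2 := by
      rw [floordiv_mid cs.length hn]; omega
    refine ⟨[PySem.Chars.lowerChar (cs[lo]'hlo)], ?_, ?_, ?_⟩
    · simp [buildSeqB, PySem.List.pyGet?_natCast, List.getElem?_eq_getElem hlo]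
      omega
    · simp [List.getElem?_eq_getElem hlo]
    · conv_lhs => rw [isCycloneLoopA]
      rw [if_neg (by simp [hmid])]
      simp [allAdj]
  | succ k ih =>
    intro lo fa fb hk hfa hfb
    obtain ⟨fa', rfl⟩ : ∃ fa', fa = fa' + 2 := ⟨fa - 2, by omega⟩
    obtain ⟨fb', rfl⟩ : ∃ fb', fb = fb' + 1 := ⟨fb - 1, by omega⟩
    have hlo : lo < cs.length := by omega
    have hlo1 : lo + 1 < cs.length := by omega
    have hhin : cs.length - 1 - lo < cs.length := by omega
    have hmidcast := floordiv_mid cs.length hn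
    obtain ⟨seq', hB', hhead', hA'⟩ := ih (lo + 1) fa' fb' (by omega) (by omega) (by omega)
    obtain ⟨x, r, rfl⟩ : ∃ x r, seq' = x :: r := by
      cases seq' with
      | nil => simp [List.getElem?_eq_getElem hlo1] at hhead'
      | cons a l => exact ⟨a, l, rfl⟩
    have hx : x = PySem.Chars.lowerChar (cs[lo + 1]'hlo1) := by
      simpa [List.getElem?_eq_getElem hlo1] using hhead'
    refine ⟨PySem.Chars.lowerChar (cs[lo]'hlo) ::
            PySem.Chars.lowerChar (cs[cs.length - 1 - lo]'hhin) :: x :: r, ?_, ?_, ?_⟩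
    · have hlonem : ¬ ((lo : Int)) = (((cs.length - 1) / 2 : Nat) : Int) := by
        intro h; omega
      conv_lhs => rw [buildSeqB]
      rw [show (((cs.length : Int) - 1) - (lo : Int)) = ((cs.length - 1 - lo : Nat) : Int) by omega]
      simp only [PySem.List.pyGet?_natCast, List.getElem?_eq_getElem hlo,
        List.getElem?_eq_getElem hhin]
      rw [if_neg hlonem]
      rw [show ((lo : Int) + 1) = ((lo + 1 : Nat) : Int) by push_cast; ring]
      rw [show (((cs.length - 1 - lo : Nat) : Int) - 1) = ((cs.length : Int) - 1) - ((lo + 1 : Nat) : Int) by push_cast; omega]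
      rw [hB']
      rfl
    · simp [List.getElem?_eq_getElem hlo]
    · have hne1 : ((lo : Int)) ≠ PySem.Int.floordiv ((cs.length : Int) - 1) 2 := by
        rw [hmidcast]; intro h; omega
      have hngt1 : ¬ ((lo : Int)) > PySem.Int.floordiv ((cs.length : Int) - 1) 2 := by
        rw [hmidcast]; intro h
        have : (cs.length - 1) / 2 < lo := by exact_mod_cast h
        omega
      have hne2 : (((cs.length - 1 - lo : Nat) : Int)) ≠ PySem.Int.floordiv ((cs.length : Int) - 1) 2 := by
        rw [hmidcast]; intro h
        have : cs.length - 1 - lo = (cs.length - 1) / 2 := by exact_mod_cast h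
        omega
      have hgt2 : (((cs.length - 1 - lo : Nat) : Int)) > PySem.Int.floordiv ((cs.length : Int) - 1) 2 := by
        rw [hmidcast]
        have : (cs.length - 1) / 2 < cs.length - 1 - lo := by omega
        exact_mod_cast this
      simp only [isCycloneLoopA]
      rw [if_pos hne1]
      rw [if_neg hngt1]
      rw [show (((cs.length : Int) - 1) - (lo : Int)) = ((cs.length - 1 - lo : Nat) : Int) by omega]
      simp only [PySem.List.pyGet?_natCast, List.getElem?_eq_getElem hlo,
        List.getElem?_eq_getElem hhin]
      rw [if_pos hne2]
      rw [if_pos hgt2]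
      rw [show (((cs.length : Int) - 1) - ((cs.length - 1 - lo : Nat) : Int) + 1) = ((lo + 1 : Nat) : Int) by push_cast; omega]
      simp only [PySem.List.pyGet?_natCast, List.getElem?_eq_getElem hlo1]
      rw [hA', hx]
      by_cases h1 : PySem.Chars.lowerChar (cs[cs.length - 1 - lo]'hhin) < PySem.Chars.lowerChar (cs[lo]'hlo)
      · simp [allAdj, h1, not_le.mpr h1]
      · by_cases h2 : PySem.Chars.lowerChar (cs[lo + 1]'hlo1) < PySem.Chars.lowerChar (cs[cs.length - 1 - lo]'hhin)
        · simp [allAdj, h1, h2, not_le.mpr h2, not_lt.mp h1]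
        · simp [allAdj, h1, h2, not_lt.mp h1, not_lt.mp h2]

-- ===== VERDICT (by name: the statement is the Claim_ definition above) =====
theorem is_cyclone_word_spec : Claim_equal_is_cyclone_word := by
  intro word _ hpre
  unfold Spec_is_cyclone_word
  have hn : 0 < word.toList.length := by
    cases hw : word.toList with
    | nil => exact absurd (by simpa using congrArg String.ofList hw) hpre
    | cons a l => simp
  obtain ⟨seq, hB, -, hA⟩ := key_lemma word.toList hn ((word.toList.length - 1) / 2) 0
    (word.toList.length + 1) (word.toList.length + 1) (by omega) (by omega) (by omega)
  simp only [Nat.cast_zero, sub_zero] at hB hA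
  simp only [is_cyclone_word, is_cyclone_word_alt]
  rw [floordiv_mid word.toList.length hn, hB, hA]
  rfl
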